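-- pv_equiv track=rewrite | github.com/luyaozou/PyMMSp | PyMMSp/inst/synthesizer.py | _replace_colon_in_curly_brace
-- ===== SOURCE A (Python) =====
-- def _replace_colon_in_curly_brace(str_in, rep_char):
--     """ Replace colon in curly brace with channel number
--     Arguments:
--         str_in: str, input string
--         rep_char: str, replacement character
--     """
--     new = []
--     in_brace = False
--     for char in str_in:
--         if char == '{':
--             in_brace = True
--         elif char == '}':
--             in_brace = False
--         elif char == ':' and in_brace:
--             char = rep_char
--         new.append(char)
--     return ''.join(new)
-- ===== SOURCE B (Python) =====
-- def _replace_colon_in_curly_brace(str_in, rep_char):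
--     """ Replace colon in curly brace with channel number (block-scan version:
--     jump between braces with str.find and rewrite each in-brace block at once). """
--     res = []
--     i, n = 0, len(str_in)
--     while i < n:
--         j = str_in.find('{', i)
--         if j == -1:
--             res.append(str_in[i:])
--             break
--         k = str_in.find('}', j + 1)
--         if k == -1:
--             res.append(str_in[i:j + 1])
--             res.append(str_in[j + 1:].replace(':', rep_char))
--             break
--         res.append(str_in[i:j + 1])
--         res.append(str_in[j + 1:k].replace(':', rep_char))
--         i = k
--     return ''.join(res)
-- ===== Notes on version B (the rewrite author's own statement) =====
-- stated objective: faster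
-- what changed: Replaced the per-character toggle-flag loop with a block scan that jumps between braces using str.find and rewrites each in-brace block with one str.replace call.
import Mathlib
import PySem

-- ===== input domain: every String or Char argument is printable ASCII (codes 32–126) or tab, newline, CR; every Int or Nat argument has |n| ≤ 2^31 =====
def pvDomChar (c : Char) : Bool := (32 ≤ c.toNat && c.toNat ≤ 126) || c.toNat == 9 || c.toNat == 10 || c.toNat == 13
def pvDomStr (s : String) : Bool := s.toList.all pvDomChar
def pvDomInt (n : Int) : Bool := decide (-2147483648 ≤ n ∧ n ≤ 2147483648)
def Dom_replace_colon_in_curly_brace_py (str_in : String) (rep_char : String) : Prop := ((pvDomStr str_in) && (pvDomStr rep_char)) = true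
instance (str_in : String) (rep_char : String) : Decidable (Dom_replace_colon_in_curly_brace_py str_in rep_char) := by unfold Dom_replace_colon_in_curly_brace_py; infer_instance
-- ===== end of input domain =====

-- B replaces A's per-character toggle-flag loop by a block scan that jumps between
-- braces with str.find and rewrites each in-brace block at once with str.replace.


-- ===== PORT A =====
-- loop body of A: "for char in str_in: if char == '{' … ; new.append(char)"
def pvALoop (rep_char : String) (st : List String × Bool) (char : Char) : List String × Bool :=
  if char = '{' then (st.1 ++ [String.ofList [char]], true)
  else if char = '}' then (st.1 ++ [String.ofList [char]], false)
  else if char = ':' && st.2 then (st.1 ++ [rep_char], st.2)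
  else (st.1 ++ [String.ofList [char]], st.2)

def replace_colon_in_curly_brace_py (str_in : String) (rep_char : String) : String :=
  PySem.Str.join "" (str_in.toList.foldl (pvALoop rep_char) ([], false)).1

-- ===== PORT B =====
-- the "while i < n" loop of B; fuel is only a totality device (the loop advances i every
-- iteration, so the initial fuel n+1 is never exhausted on the actual call)
def pvAltGo (s rep : List Char) (n : Nat) : Nat → Nat → List Char → List Char
  | 0, _, acc => acc
  | fuel + 1, i, acc =>
    if i < n then
      let j := PySem.Chars.findFrom s ['{'] (i : Int)          -- j = str_in.find('{', i)
      if j = -1 then acc ++ PySem.List.slice s (some (i : Int)) none   -- res.append(str_in[i:])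
      else
        let k := PySem.Chars.findFrom s ['}'] (j + 1)          -- k = str_in.find('}', j + 1)
        if k = -1 then
          acc ++ PySem.List.slice s (some (i : Int)) (some (j + 1))
              ++ PySem.Chars.replace (PySem.List.slice s (some (j + 1)) none) [':'] rep
        else
          pvAltGo s rep n fuel k.toNat
            (acc ++ PySem.List.slice s (some (i : Int)) (some (j + 1))
                 ++ PySem.Chars.replace (PySem.List.slice s (some (j + 1)) (some k)) [':'] rep)
    else acc

def replace_colon_in_curly_brace_py_alt (str_in : String) (rep_char : String) : String :=
  String.ofList (pvAltGo str_in.toList rep_char.toList str_in.toList.length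
                  (str_in.toList.length + 1) 0 [])

-- ===== PRECONDITION & SPEC =====
def Spec_replace_colon_in_curly_brace_py (str_in : String) (rep_char : String) (out : String) : Prop := out = replace_colon_in_curly_brace_py_alt str_in rep_char
instance (str_in : String) (rep_char : String) (out : String) : Decidable (Spec_replace_colon_in_curly_brace_py str_in rep_char out) := by unfold Spec_replace_colon_in_curly_brace_py; infer_instance

-- ===== CLAIM (what is proved, stated in full; the proofs are below) =====
def Claim_equal_replace_colon_in_curly_brace_py : Prop := ∀ (str_in : String) (rep_char : String), Dom_replace_colon_in_curly_brace_py str_in rep_char → Spec_replace_colon_in_curly_brace_py str_in rep_char (replace_colon_in_curly_brace_py str_in rep_char)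

-- ===== LEMMAS AND PROOFS =====

-- A's state machine written as structural recursion: the reference both ports are reduced to
def pvFA (rep : List Char) : List Char → Bool → List Char
  | [], _ => []
  | c :: t, b =>
    if c = '{' then c :: pvFA rep t true
    else if c = '}' then c :: pvFA rep t false
    else if c = ':' && b then rep ++ pvFA rep t b
    else c :: pvFA rep t b

-- colon substitution on a block
def pvFlat (rep : List Char) (cs : List Char) : List Char :=
  cs.flatMap (fun c => if c = ':' then rep else [c])

theorem pv_join_nil (l : List (List Char)) : PySem.Chars.join [] l = l.flatten := by
  induction l with
  | nil => simp [PySem.Chars.join, List.intercalate]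
  | cons x t ih =>
    cases t with
    | nil => simp [PySem.Chars.join, List.intercalate]
    | cons y u =>
      simp [PySem.Chars.join, List.intercalate] at ih ⊢
      simpa using ih

theorem pv_replace_go (rep : List Char) :
    ∀ (fuel : Nat) (cs acc : List Char), cs.length ≤ fuel →
      PySem.Chars.replace.go [':'] rep fuel cs acc = acc.reverse ++ pvFlat rep cs := by
  intro fuel
  induction fuel with
  | zero =>
    intro cs acc h
    have hc : cs = [] := by cases cs <;> simp_all
    subst hc
    simp [PySem.Chars.replace.go, pvFlat]
  | succ n ih =>
    intro cs acc h
    cases cs with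
    | nil => simp [PySem.Chars.replace.go, pvFlat]
    | cons c t =>
      simp only [PySem.Chars.replace.go]
      by_cases hc : c = ':'
      · subst hc
        simp [List.isPrefixOf, ih t _ (by simpa using h), pvFlat]
      · simp [List.isPrefixOf, hc, ih t _ (by simpa using h), pvFlat, Ne.symm hc]

theorem pv_replace_colon (rep cs : List Char) :
    PySem.Chars.replace cs [':'] rep = pvFlat rep cs := by
  simp [PySem.Chars.replace, pv_replace_go rep cs.length cs [] le_rfl]

theorem pvA_loop (rep_char : String) (cs : List Char) :
    ∀ (acc : List String) (b : Bool),
      ((cs.foldl (pvALoop rep_char) (acc, b)).1).flatMap String.toList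
        = acc.flatMap String.toList ++ pvFA rep_char.toList cs b := by
  induction cs with
  | nil => intro acc b; simp [pvFA]
  | cons c t ih =>
    intro acc b
    by_cases h1 : c = '{'
    · subst h1; simp [pvALoop, pvFA, ih]
    · by_cases h2 : c = '}'
      · subst h2; simp [pvALoop, pvFA, h1, ih]
      · by_cases h3 : c = ':' ∧ b
        · obtain ⟨h3a, h3b⟩ := h3
          subst h3a
          subst h3b
          simp [pvALoop, pvFA, h1, h2, ih]
        · have hf : (decide (c = ':') && b) = false := by
            rcases Bool.eq_false_or_eq_true b with hb | hb <;> simp_all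
          simp [pvALoop, pvFA, h1, h2, hf, ih]

theorem pvFA_no_lbrace (rep : List Char) :
    ∀ (pre rest : List Char), '{' ∉ pre →
      pvFA rep (pre ++ rest) false = pre ++ pvFA rep rest false := by
  intro pre
  induction pre with
  | nil => simp
  | cons c t ih =>
    intro rest h
    simp only [List.mem_cons, not_or] at h
    obtain ⟨h1, h2⟩ := h
    by_cases hc : c = '}'
    · simp [pvFA, Ne.symm h1, hc, ih rest h2]
    · simp [pvFA, Ne.symm h1, hc, ih rest h2]

theorem pvFA_no_rbrace (rep : List Char) :
    ∀ (pre rest : List Char), '}' ∉ pre →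
      pvFA rep (pre ++ rest) true = pvFlat rep pre ++ pvFA rep rest true := by
  intro pre
  induction pre with
  | nil => simp [pvFlat]
  | cons c t ih =>
    intro rest h
    simp only [List.mem_cons, not_or] at h
    obtain ⟨h1, h2⟩ := h
    by_cases hc : c = '{'
    · simp [pvFA, pvFlat, hc, ih rest h2, pvFlat]
    · by_cases hcol : c = ':'
      · simp [pvFA, pvFlat, hc, Ne.symm h1, hcol, ih rest h2]
      · simp [pvFA, pvFlat, hc, Ne.symm h1, hcol, ih rest h2]

theorem pv_single_prefix (a : Char) (l : List Char) : [a] <+: l ↔ ∃ t, l = a :: t := by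
  cases l <;> simp [List.cons_prefix_cons, eq_comm]

theorem pv_decomp (s : List Char) (i jn : Nat) (h : i ≤ jn) :
    List.drop i s = List.take (jn - i) (List.drop i s) ++ List.drop jn s := by
  conv_lhs => rw [← List.take_append_drop (jn - i) (List.drop i s)]
  rw [List.drop_drop]
  have h2 : i + (jn - i) = jn := by omega
  rw [h2]

theorem pv_seg_no (c : Char) (s : List Char) (i jn : Nat) (hij : i ≤ jn) (hjn : jn ≤ s.length)
    (hmin : ∀ m, i ≤ m → m < jn → ¬ [c] <+: List.drop m s) :
    c ∉ List.take (jn - i) (List.drop i s) := by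
  intro hmem
  obtain ⟨m, hm, hget⟩ := List.getElem_of_mem hmem
  have hlen : (List.take (jn - i) (List.drop i s)).length = jn - i := by simp; omega
  rw [hlen] at hm
  have h1 : (List.take (jn - i) (List.drop i s))[m] = s[i + m]'(by omega) := by
    simp [List.getElem_take, List.getElem_drop]
  apply hmin (i + m) (by omega) (by omega)
  rw [pv_single_prefix]
  refine ⟨List.drop (i + m + 1) s, ?_⟩
  rw [List.drop_eq_getElem_cons (by omega)]
  rw [h1] at hget
  simp [hget]

theorem pvFA_rb (rep : List Char) (t : List Char) (b : Bool) :
    pvFA rep ('}' :: t) b = '}' :: pvFA rep t false := by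
  simp [pvFA]

theorem pvAltGo_spec (s rep : List Char) :
    ∀ (fuel i : Nat) (acc : List Char), i ≤ s.length → s.length - i < fuel →
      pvAltGo s rep s.length fuel i acc = acc ++ pvFA rep (s.drop i) false := by
  intro fuel
  induction fuel with
  | zero => intro i acc _ h; omega
  | succ fuel ih =>
    intro i acc hi hfuel
    by_cases hin : i < s.length
    case neg =>
      have : i = s.length := by omega
      subst this
      simp [pvAltGo, pvFA]
    case pos =>
    simp only [pvAltGo, if_pos hin]
    by_cases hj : PySem.Chars.findFrom s ['{'] (i : Int) = -1
    · rw [if_pos hj]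
      rw [PySem.List.slice_from s (by positivity)]
      have hnob : '{' ∉ List.drop i s := by
        rw [PySem.Chars.findFrom_natCast_eq_neg_one_iff s ['{'] i hi] at hj
        simpa [List.singleton_infix_iff] using hj
      have hfa := pvFA_no_lbrace rep (List.drop i s) [] hnob
      simp only [List.append_nil] at hfa
      simp [hfa, pvFA]
    · rw [if_neg hj]
      obtain ⟨hij, hjpre, hjmin⟩ := PySem.Chars.findFrom_natCast_spec s ['{'] i hi hj
      set j := PySem.Chars.findFrom s ['{'] (i : Int) with hjdef
      set jn := j.toNat with hjn
      have hj0 : 0 ≤ j := le_trans (by positivity) hij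
      have hijn : i ≤ jn := by omega
      obtain ⟨t1, ht1⟩ := (pv_single_prefix _ _).1 hjpre
      have hjlen : jn < s.length := by
        by_contra hc
        rw [List.drop_eq_nil_of_le (by omega)] at ht1
        simp at ht1
      have ht1' : List.drop jn s = '{' :: List.drop (jn + 1) s := by
        rw [List.drop_eq_getElem_cons hjlen] at ht1
        injection ht1 with h5 h6
        rw [List.drop_eq_getElem_cons hjlen, h5]
      set seg1 := List.take (jn - i) (List.drop i s) with hseg1
      have hdec1 : List.drop i s = seg1 ++ '{' :: List.drop (jn + 1) s := by
        rw [← ht1', hseg1]; exact pv_decomp s i jn hijn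
      have hseg1no : '{' ∉ seg1 :=
        pv_seg_no '{' s i jn hijn (by omega) (fun m h1 h2 => hjmin m h1 h2)
      have hseg1len : seg1.length = jn - i := by simp [hseg1]; omega
      have hj1 : j + 1 = ((jn + 1 : Nat) : Int) := by push_cast; omega
      have hjn1le : jn + 1 ≤ s.length := by omega
      have hsliceA : PySem.List.slice s (some (i : Int)) (some (j + 1)) = seg1 ++ ['{'] := by
        rw [hj1, PySem.List.slice_natCast]
        rw [hdec1, List.take_append]
        rw [hseg1len]
        have h3 : jn + 1 - i - (jn - i) = 1 := by omega
        rw [h3, List.take_of_length_le (by rw [hseg1len]; omega)]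
        simp
      by_cases hk : PySem.Chars.findFrom s ['}'] (j + 1) = -1
      · rw [if_pos hk]
        rw [hj1] at hk
        have hsliceA' : PySem.List.slice s (some (i : Int)) (some ((jn + 1 : Nat) : Int))
            = seg1 ++ ['{'] := by rw [← hj1]; exact hsliceA
        rw [hj1, hsliceA', PySem.List.slice_from s (by positivity)]
        simp only [Int.toNat_natCast]
        rw [pv_replace_colon]
        have hnob : '}' ∉ List.drop (jn + 1) s := by
          rw [PySem.Chars.findFrom_natCast_eq_neg_one_iff s ['}'] (jn + 1) hjn1le] at hk
          simpa [List.singleton_infix_iff] using hk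
        have hfa2 := pvFA_no_rbrace rep (List.drop (jn + 1) s) [] hnob
        simp only [List.append_nil] at hfa2
        have hfa2' : pvFA rep (List.drop (jn + 1) s) true = pvFlat rep (List.drop (jn + 1) s) := by
          rw [hfa2]; simp [pvFA, pvFlat]
        rw [hdec1, pvFA_no_lbrace rep seg1 _ hseg1no]
        simp [pvFA, hfa2']
      · rw [if_neg hk]
        rw [hj1] at hk
        obtain ⟨hk1, hkpre, hkmin⟩ := PySem.Chars.findFrom_natCast_spec s ['}'] (jn + 1) hjn1le hk
        rw [← hj1] at hk1 hkpre hkmin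
        set k := PySem.Chars.findFrom s ['}'] (j + 1) with hkdef
        set kn := k.toNat with hkn
        have hk0 : 0 ≤ k := le_trans (by omega) hk1
        have hjnkn : jn + 1 ≤ kn := by omega
        obtain ⟨t2, ht2⟩ := (pv_single_prefix _ _).1 hkpre
        have hklen : kn < s.length := by
          by_contra hc
          rw [List.drop_eq_nil_of_le (by omega)] at ht2
          simp at ht2
        have ht2' : List.drop kn s = '}' :: List.drop (kn + 1) s := by
          rw [List.drop_eq_getElem_cons hklen] at ht2
          injection ht2 with h5 h6
          rw [List.drop_eq_getElem_cons hklen, h5]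
        set seg2 := List.take (kn - (jn + 1)) (List.drop (jn + 1) s) with hseg2
        have hdec2 : List.drop (jn + 1) s = seg2 ++ List.drop kn s := pv_decomp s (jn + 1) kn hjnkn
        have hseg2no : '}' ∉ seg2 :=
          pv_seg_no '}' s (jn + 1) kn hjnkn (by omega) (fun m h1 h2 => hkmin m h1 h2)
        have hsliceB : PySem.List.slice s (some (j + 1)) (some k) = seg2 := by
          have hk2 : k = ((kn : Nat) : Int) := by omega
          rw [hj1, hk2, PySem.List.slice_natCast]
        rw [hsliceB, hsliceA, pv_replace_colon]
        rw [ih kn _ (by omega) (by omega)]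
        rw [hdec1, pvFA_no_lbrace rep seg1 _ hseg1no]
        have hmid : pvFA rep ('{' :: List.drop (jn + 1) s) false
            = '{' :: (pvFlat rep seg2 ++ pvFA rep (List.drop kn s) false) := by
          have h4 : pvFA rep ('{' :: List.drop (jn + 1) s) false
              = '{' :: pvFA rep (List.drop (jn + 1) s) true := by
            simp [pvFA]
          rw [h4, hdec2, pvFA_no_rbrace rep seg2 _ hseg2no]
          rw [ht2', pvFA_rb]
          rw [← pvFA_rb rep _ false, ← ht2']
        rw [hmid]
        simp

-- ===== VERDICT (by name: the statement is the Claim_ definition above) =====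
theorem replace_colon_in_curly_brace_py_spec : Claim_equal_replace_colon_in_curly_brace_py := by
  intro str_in rep_char _dom
  unfold Spec_replace_colon_in_curly_brace_py
  rw [← String.toList_inj]
  unfold replace_colon_in_curly_brace_py replace_colon_in_curly_brace_py_alt
  rw [PySem.Str.toList_join]
  have h0 : ("" : String).toList = [] := rfl
  rw [h0, pv_join_nil]
  rw [← List.flatMap_def]
  rw [pvA_loop rep_char str_in.toList [] false]
  rw [String.toList_ofList]
  rw [pvAltGo_spec str_in.toList rep_char.toList (str_in.toList.length + 1) 0 []
        (Nat.zero_le _) (by omega)]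
  simp
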